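-- pv_equiv track=rewrite | github.com/NovasPlace/agent-atlas | context_recall.py | _parse_active_project
-- ===== SOURCE A (Python) =====
-- def _parse_active_project(hot_content: str) -> str:
--     """Extract first active project row from the ACTIVE PROJECTS table."""
--     in_table = False
--     for line in hot_content.splitlines():
--         stripped = line.strip()
--         if "| Project" in stripped:
--             in_table = True
--             continue
--         if in_table and stripped.startswith("|---"):
--             continue
--         if in_table and stripped.startswith("|"):
--             cols = [c.strip() for c in stripped.split("|") if c.strip()]
--             if len(cols) >= 3:
--                 name = cols[0]
--                 status = cols[2]
--                 return f"{name} — {status}"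
--         elif in_table and not stripped.startswith("|"):
--             break
--     return "Unknown"
-- ===== SOURCE B (Python) =====
-- def _parse_active_project(hot_content: str) -> str:
--     """Extract first active project row from the ACTIVE PROJECTS table."""
--     stripped = [l.strip() for l in hot_content.splitlines()]
--     headers = [i for i, s in enumerate(stripped) if "| Project" in s]
--     if not headers:
--         return "Unknown"
--     after = stripped[headers[0] + 1:]
--     stops = [j for j, s in enumerate(after) if not (s.startswith("|") or "| Project" in s)]
--     region = after[:stops[0]] if stops else after
--     rows = [[c.strip() for c in s.split("|") if c.strip()]
--             for s in region if "| Project" not in s and not s.startswith("|---")]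
--     hits = [cols for cols in rows if len(cols) >= 3]
--     return f"{hits[0][0]} — {hits[0][2]}" if hits else "Unknown"
-- ===== Notes on version B (the rewrite author's own statement) =====
-- stated objective: alternative
-- what changed: Replaces A's single stateful loop threading an in_table flag through branch-ordered if/continue/break logic with a declarative staged pipeline: strip all lines once, locate the header and the first stop line by index comprehensions, slice out the table region, filter it down to data rows, and take the first row with enough columns.
import Mathlib
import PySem

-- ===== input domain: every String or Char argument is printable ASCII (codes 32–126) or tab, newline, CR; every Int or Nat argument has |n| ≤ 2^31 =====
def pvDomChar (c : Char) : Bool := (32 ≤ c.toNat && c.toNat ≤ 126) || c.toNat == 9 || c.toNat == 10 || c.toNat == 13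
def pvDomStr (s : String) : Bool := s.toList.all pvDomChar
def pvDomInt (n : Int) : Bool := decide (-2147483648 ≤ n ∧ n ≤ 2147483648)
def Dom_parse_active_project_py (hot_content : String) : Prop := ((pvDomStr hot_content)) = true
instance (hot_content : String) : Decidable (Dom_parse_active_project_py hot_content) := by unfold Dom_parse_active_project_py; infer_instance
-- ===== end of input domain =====

-- B replaces A's stateful flag-driven scan by a declarative staged pipeline (strip all lines,
-- index comprehensions for the header and the stop line, slices, filters, first hit);
-- objective: alternative decomposition, same cost.

-- ===== PORT A =====
-- row parsing '[c.strip() for c in stripped.split("|") if c.strip()]' (this source line is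
-- identical in A and in B, so the helper is shared by both ports)
def pvCols (s : List Char) : List String :=
  ((PySem.Chars.splitOn s ['|']).filter (fun c => PySem.Chars.strip c ≠ [])).map
    (fun c => String.ofList (PySem.Chars.strip c))

def pvAloop : List String → Bool → String
  | [], _ => "Unknown"
  | line :: rest, inT =>
    let s := PySem.Chars.strip line.toList
    if PySem.Chars.isIn "| Project".toList s then pvAloop rest true
    else if inT && PySem.Chars.startswith s "|---".toList then pvAloop rest inT
    else if inT && PySem.Chars.startswith s "|".toList then
      let cols := pvCols s
      if 3 ≤ cols.length then
        -- cols[0], cols[2]: in range since 3 ≤ len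
        PySem.List.pyGetD cols 0 "" ++ " — " ++ PySem.List.pyGetD cols 2 ""
      else pvAloop rest inT
    else if inT && !(PySem.Chars.startswith s "|".toList) then "Unknown"  -- break
    else pvAloop rest inT

def parse_active_project_py (hot_content : String) : String :=
  pvAloop (PySem.Str.splitlines hot_content) false

-- ===== PORT B =====
def parse_active_project_py_alt (hot_content : String) : String :=
  let stripped := (PySem.Str.splitlines hot_content).map (fun l => PySem.Chars.strip l.toList)
  let headers := ((PySem.List.enumerate stripped 0).filter
      (fun x => PySem.Chars.isIn "| Project".toList x.2)).map (·.1)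
  match headers with
  | [] => "Unknown"
  | i :: _ =>
    let after := PySem.List.slice stripped (some (i + 1)) none
    let stops := ((PySem.List.enumerate after 0).filter
        (fun x => !(PySem.Chars.startswith x.2 "|".toList
                    || PySem.Chars.isIn "| Project".toList x.2))).map (·.1)
    let region := match stops with
      | [] => after
      | j :: _ => PySem.List.slice after none (some j)
    let rows := (region.filter (fun s =>
        !PySem.Chars.isIn "| Project".toList s
        && !PySem.Chars.startswith s "|---".toList)).map pvCols
    let hits := rows.filter (fun c => 3 ≤ c.length)
    match hits with
    | [] => "Unknown"
    | h :: _ => PySem.List.pyGetD h 0 "" ++ " — " ++ PySem.List.pyGetD h 2 ""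

-- ===== PRECONDITION & SPEC =====
def Spec_parse_active_project_py (hot_content : String) (out : String) : Prop := out = parse_active_project_py_alt hot_content
instance (hot_content : String) (out : String) : Decidable (Spec_parse_active_project_py hot_content out) := by unfold Spec_parse_active_project_py; infer_instance

-- ===== CLAIM (what is proved, stated in full; the proofs are below) =====
def Claim_equal_parse_active_project_py : Prop := ∀ (hot_content : String), Dom_parse_active_project_py hot_content → Spec_parse_active_project_py hot_content (parse_active_project_py hot_content)

-- ===== LEMMAS AND PROOFS =====

-- abbreviations for the three line predicates (proof-only)
def pvHdr (s : List Char) : Bool := PySem.Chars.isIn "| Project".toList s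
def pvReg (s : List Char) : Bool := PySem.Chars.startswith s "|".toList || pvHdr s
def pvRow (s : List Char) : Bool := !pvHdr s && !PySem.Chars.startswith s "|---".toList

-- "|---" prefix implies "|" prefix
lemma pvBar_of_dashes {s : List Char}
    (h : PySem.Chars.startswith s "|---".toList = true) :
    PySem.Chars.startswith s "|".toList = true := by
  rw [PySem.Chars.startswith_iff] at h ⊢
  exact List.IsPrefix.trans (by decide) h

-- the tail of B's pipeline (after the region is cut): proof-only name
def pvRowsPipe (ss : List (List Char)) : String :=
  match ((ss.filter pvRow).map pvCols).filter (fun c => 3 ≤ c.length) with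
  | [] => "Unknown"
  | h :: _ => PySem.List.pyGetD h 0 "" ++ " — " ++ PySem.List.pyGetD h 2 ""

-- every index produced by an index-comprehension over enumerate ss n is ≥ n
lemma pvEnum_ge {α : Type} (q : Int × α → Bool) :
    ∀ (ss : List α) (n i : Int),
      i ∈ ((PySem.List.enumerate ss n).filter q).map (·.1) → n ≤ i := by
  intro ss n i hi
  simp only [List.mem_map, List.mem_filter] at hi
  obtain ⟨⟨k, x⟩, ⟨hmem, _⟩, rfl⟩ := hi
  rw [PySem.List.mem_enumerate_iff] at hmem
  obtain ⟨j, _, heq⟩ := hmem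
  simp only [Prod.mk.injEq] at heq
  omega

-- the 'stops' comprehension + slice compute takeWhile of the region predicate
lemma pvStops_take : ∀ (ss : List (List Char)) (n : Int), 0 ≤ n →
    (match ((PySem.List.enumerate ss n).filter (fun x => !pvReg x.2)).map (·.1) with
      | [] => ss
      | j :: _ => PySem.List.slice ss none (some (j - n))) = ss.takeWhile pvReg := by
  intro ss
  induction ss with
  | nil => intro n _; rfl
  | cons s rest ih =>
    intro n hn
    rw [PySem.List.enumerate_cons, List.filter_cons]
    by_cases hp : pvReg s = true
    · simp only [hp, Bool.not_true, Bool.false_eq_true, if_false,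
        List.takeWhile_cons_of_pos hp]
      have hih := ih (n + 1) (by omega)
      rcases hst : ((PySem.List.enumerate rest (n+1)).filter (fun x => !pvReg x.2)).map (·.1)
        with _ | ⟨j, js⟩
      · rw [hst] at hih; rw [hst]
        exact congrArg (s :: ·) hih
      · rw [hst] at hih; rw [hst]
        have hj : n + 1 ≤ j :=
          pvEnum_ge (fun x => !pvReg x.2) rest (n+1) j (by rw [hst]; exact List.mem_cons_self)
        have hih' : PySem.List.slice rest none (some (j - (n+1))) = List.takeWhile pvReg rest := hih
        show PySem.List.slice (s :: rest) none (some (j - n)) = s :: List.takeWhile pvReg rest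
        rw [PySem.List.slice_to rest (show (0:Int) ≤ j - (n+1) by omega)] at hih'
        rw [PySem.List.slice_to (s :: rest) (show (0:Int) ≤ j - n by omega)]
        have hk : (j - n).toNat = (j - (n+1)).toNat + 1 := by omega
        rw [hk, List.take_succ_cons]
        exact congrArg (s :: ·) hih'
    · have hp' : pvReg s = false := by simpa using hp
      have hneg : ¬ pvReg s = true := by simp [hp']
      simp only [hp', Bool.not_false, if_true, List.map_cons,
        List.takeWhile_cons_of_neg hneg]
      rw [PySem.List.slice_to (s :: rest) (show (0:Int) ≤ n - n by omega)]
      simp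

-- A's in-table loop equals B's row pipeline over the takeWhile-region of the stripped lines
lemma pvA_true : ∀ (lines : List String),
    pvAloop lines true =
      pvRowsPipe ((lines.map (fun l => PySem.Chars.strip l.toList)).takeWhile pvReg) := by
  intro lines
  induction lines with
  | nil => rfl
  | cons line rest ih =>
    simp only [pvAloop, List.map_cons, Bool.true_and]
    set s := PySem.Chars.strip line.toList with hs
    by_cases h1 : pvHdr s = true
    · have hp : pvReg s = true := by unfold pvReg; rw [h1]; simp
      rw [List.takeWhile_cons_of_pos hp]
      have h1i : PySem.Chars.isIn "| Project".toList s = true := h1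
      have hrow : pvRow s = false := by unfold pvRow; rw [h1]; rfl
      simp only [h1i, if_true, ih, pvRowsPipe, List.filter_cons, hrow,
        Bool.false_eq_true, if_false]
    · have h1' : PySem.Chars.isIn "| Project".toList s = false := by
        simpa [pvHdr] using h1
      simp only [h1', Bool.false_eq_true, if_false]
      by_cases h2 : PySem.Chars.startswith s "|---".toList = true
      · have hbar := pvBar_of_dashes h2
        have hp : pvReg s = true := by unfold pvReg; rw [hbar]; rfl
        rw [List.takeWhile_cons_of_pos hp]
        have hrow : pvRow s = false := by unfold pvRow; rw [h2]; simp
        simp only [h2, if_true, ih, pvRowsPipe, List.filter_cons, hrow,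
          Bool.false_eq_true, if_false]
      · have h2' : PySem.Chars.startswith s "|---".toList = false := by simpa using h2
        simp only [h2', Bool.false_eq_true, if_false]
        by_cases h3 : PySem.Chars.startswith s "|".toList = true
        · have hp : pvReg s = true := by unfold pvReg; rw [h3]; rfl
          rw [List.takeWhile_cons_of_pos hp]
          have hrow : pvRow s = true := by unfold pvRow; rw [h2']; unfold pvHdr; rw [h1']; rfl
          simp only [h3, if_true, pvRowsPipe, List.filter_cons, hrow, List.map_cons]
          by_cases h4 : 3 ≤ (pvCols s).length
          · simp [h4]
          · have h4' : decide (3 ≤ (pvCols s).length) = false := by simp [h4]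
            simp only [h4, if_false, ih, pvRowsPipe]
            simp
        · have h3' : PySem.Chars.startswith s "|".toList = false := by simpa using h3
          have hp : pvReg s = false := by unfold pvReg; rw [h3']; unfold pvHdr; rw [h1']; rfl
          have hneg : ¬ pvReg s = true := by simp [hp]
          rw [List.takeWhile_cons_of_neg hneg]
          have h3'' : PySem.Chars.startswith s ['|'] = false := h3'
          simp [h3'', pvRowsPipe]

-- A's pre-table loop equals B's header search + the rest of the pipeline
lemma pvA_false : ∀ (lines : List String) (n : Int), 0 ≤ n →
    pvAloop lines false =
      (match ((PySem.List.enumerate (lines.map (fun l => PySem.Chars.strip l.toList)) n).filter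
          (fun x => pvHdr x.2)).map (·.1) with
        | [] => "Unknown"
        | i :: _ =>
          pvRowsPipe ((PySem.List.slice (lines.map (fun l => PySem.Chars.strip l.toList))
              (some (i + 1 - n)) none).takeWhile pvReg)) := by
  intro lines
  induction lines with
  | nil => intro n _; rfl
  | cons line rest ih =>
    intro n hn
    simp only [List.map_cons, PySem.List.enumerate_cons, List.filter_cons]
    set s := PySem.Chars.strip line.toList with hs
    by_cases h1 : pvHdr s = true
    · simp only [h1, if_true, List.map_cons]
      have hA : pvAloop (line :: rest) false = pvAloop rest true := by
        simp only [pvAloop, ← hs]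
        have h1c : PySem.Chars.isIn ['|', ' ', 'P', 'r', 'o', 'j', 'e', 'c', 't'] s = true := h1
        simp [h1c]
      rw [hA, pvA_true]
      rw [PySem.List.slice_from _ (show (0:Int) ≤ n + 1 - n by omega)]
      have hk : (n + 1 - n).toNat = 1 := by omega
      rw [hk]
      rfl
    · have h1' : pvHdr s = false := by simpa using h1
      simp only [h1', Bool.false_eq_true, if_false]
      have hA : pvAloop (line :: rest) false = pvAloop rest false := by
        simp only [pvAloop, ← hs]
        have hnoc : PySem.Chars.isIn ['|', ' ', 'P', 'r', 'o', 'j', 'e', 'c', 't'] s = false := h1'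
        simp [hnoc]
      rw [hA, ih (n + 1) (by omega)]
      rcases hst : ((PySem.List.enumerate (rest.map (fun l => PySem.Chars.strip l.toList)) (n+1)).filter
          (fun x => pvHdr x.2)).map (·.1) with _ | ⟨i, is⟩
      · rw [hst]
      · rw [hst]
        have hi : n + 1 ≤ i :=
          pvEnum_ge (fun x => pvHdr x.2) _ (n+1) i (by rw [hst]; exact List.mem_cons_self)
        show pvRowsPipe ((PySem.List.slice (rest.map (fun l => PySem.Chars.strip l.toList))
              (some (i + 1 - (n+1))) none).takeWhile pvReg) =
          pvRowsPipe ((PySem.List.slice (PySem.Chars.strip line.toList ::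
              rest.map (fun l => PySem.Chars.strip l.toList)) (some (i + 1 - n)) none).takeWhile pvReg)
        rw [PySem.List.slice_from _ (show (0:Int) ≤ i + 1 - (n+1) by omega),
          PySem.List.slice_from _ (show (0:Int) ≤ i + 1 - n by omega)]
        have hk : (i + 1 - n).toNat = (i + 1 - (n+1)).toNat + 1 := by omega
        rw [hk, List.drop_succ_cons]

-- pvStops_take at offset 0, in the exact shape B's 'region' expression has
lemma pvStops_take0 (ss : List (List Char)) :
    (match ((PySem.List.enumerate ss 0).filter (fun x => !pvReg x.2)).map (·.1) with
      | [] => ss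
      | j :: _ => PySem.List.slice ss none (some j)) = ss.takeWhile pvReg := by
  have h := pvStops_take ss 0 le_rfl
  rcases hst : ((PySem.List.enumerate ss 0).filter (fun x => !pvReg x.2)).map (·.1)
    with _ | ⟨j, js⟩
  · rw [hst] at h; rw [hst]; exact h
  · rw [hst] at h; rw [hst]
    have h' : PySem.List.slice ss none (some (j - 0)) = ss.takeWhile pvReg := h
    rw [sub_zero] at h'
    exact h'

-- ===== VERDICT (by name: the statement is the Claim_ definition above) =====
theorem parse_active_project_py_spec : Claim_equal_parse_active_project_py := by
  intro hot _
  unfold Spec_parse_active_project_py parse_active_project_py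
  -- zeta/beta-reduce B's let-chain into match form (definitional)
  have h0 : parse_active_project_py_alt hot =
      (match ((PySem.List.enumerate ((PySem.Str.splitlines hot).map
            (fun l => PySem.Chars.strip l.toList)) 0).filter (fun x => pvHdr x.2)).map (·.1) with
        | [] => "Unknown"
        | i :: _ =>
          pvRowsPipe (match ((PySem.List.enumerate
              (PySem.List.slice ((PySem.Str.splitlines hot).map
                (fun l => PySem.Chars.strip l.toList)) (some (i + 1)) none) 0).filter
              (fun x => !pvReg x.2)).map (·.1) with
            | [] => PySem.List.slice ((PySem.Str.splitlines hot).map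
                (fun l => PySem.Chars.strip l.toList)) (some (i + 1)) none
            | j :: _ => PySem.List.slice (PySem.List.slice ((PySem.Str.splitlines hot).map
                (fun l => PySem.Chars.strip l.toList)) (some (i + 1)) none) none (some j))) := rfl
  rw [h0, pvA_false (PySem.Str.splitlines hot) 0 le_rfl]
  rcases hst : ((PySem.List.enumerate ((PySem.Str.splitlines hot).map
      (fun l => PySem.Chars.strip l.toList)) 0).filter (fun x => pvHdr x.2)).map (·.1)
    with _ | ⟨i, is⟩
  · rw [hst]
  · rw [hst]
    show pvRowsPipe ((PySem.List.slice ((PySem.Str.splitlines hot).map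
        (fun l => PySem.Chars.strip l.toList)) (some (i + 1 - 0)) none).takeWhile pvReg) = _
    rw [sub_zero]
    exact (congrArg pvRowsPipe (pvStops_take0 _)).symm
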